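-- pv_equiv track=rewrite | github.com/usmanNoor5/CCRIPT_AGENCY | datasets/my_dataset_to_yoloseg.py | clip_polygon_to_tile
-- ===== SOURCE A (Python) =====
-- def clip_polygon_to_tile(seg_pts, tx, ty, tile_size):
--     """Clip polygon to tile and return normalized YOLO-seg coordinates."""
--     xs = seg_pts[0::2]
--     ys = seg_pts[1::2]
--
--     # Shift to tile coords and clip
--     txs = [max(0, min(tile_size, x - tx)) for x in xs]
--     tys = [max(0, min(tile_size, y - ty)) for y in ys]
--
--     # Check if clipped polygon is too small
--     if max(txs) - min(txs) < 3 or max(tys) - min(tys) < 3: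
--         return None
--
--     # Normalize to [0, 1]
--     coords = []
--     for x, y in zip(txs, tys):
--         coords.append(f"{x / tile_size:.6f}")
--         coords.append(f"{y / tile_size:.6f}")
--
--     return coords
-- ===== SOURCE B (Python) =====
-- def clip_polygon_to_tile(seg_pts, tx, ty, tile_size):
--     """Clip polygon to tile and return normalized YOLO-seg coordinates.
--
--     Single fused pass: clip each coordinate while maintaining running extrema,
--     then one flat comprehension for the formatted output.
--     """
--     txs, tys = [], []
--     minx = maxx = miny = maxy = None
--     i, n = 0, len(seg_pts)
--     while i < n:
--         c = max(0, min(seg_pts[i] - tx, tile_size))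
--         txs.append(c)
--         if minx is None or c < minx:
--             minx = c
--         if maxx is None or maxx < c:
--             maxx = c
--         if i + 1 < n:
--             c = max(0, min(seg_pts[i + 1] - ty, tile_size))
--             tys.append(c)
--             if miny is None or c < miny:
--                 miny = c
--             if maxy is None or maxy < c:
--                 maxy = c
--         i += 2
--     if maxx - minx < 3 or maxy - miny < 3:
--         return None
--     return [f"{c / tile_size:.6f}" for x, y in zip(txs, tys) for c in (x, y)]
-- ===== Notes on version B (the rewrite author's own statement) =====
-- stated objective: alternative
-- what changed: Replaced A's pipeline (two step-2 slices, two clipping comprehensions, four max/min list scans, then an append loop) by one fused index-stepping pass that clips and maintains running min/max for x and y simultaneously, plus a single flat comprehension for the output.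
import Mathlib
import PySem

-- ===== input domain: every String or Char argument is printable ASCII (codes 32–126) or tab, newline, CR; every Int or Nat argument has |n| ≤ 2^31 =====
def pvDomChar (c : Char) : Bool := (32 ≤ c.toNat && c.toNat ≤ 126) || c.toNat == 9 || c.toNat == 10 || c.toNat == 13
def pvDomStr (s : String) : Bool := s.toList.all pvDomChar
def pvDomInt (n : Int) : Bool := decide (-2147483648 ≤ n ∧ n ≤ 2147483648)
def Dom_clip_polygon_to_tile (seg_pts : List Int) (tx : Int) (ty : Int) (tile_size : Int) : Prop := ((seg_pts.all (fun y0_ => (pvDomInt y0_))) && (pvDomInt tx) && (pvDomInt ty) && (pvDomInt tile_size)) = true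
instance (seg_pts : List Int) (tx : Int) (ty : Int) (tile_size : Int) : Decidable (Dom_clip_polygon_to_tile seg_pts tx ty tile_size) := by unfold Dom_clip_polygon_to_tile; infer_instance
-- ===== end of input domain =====

-- B fuses A's slice/clip/extrema passes into one index-stepping loop (objective: alternative, same cost).

-- Shared hand port of the f-string  f"{p / tile_size:.6f}"  (both Pythons contain this
-- exact expression): CPython divides the ints as binary64 (round-to-nearest, ties-to-even)
-- and then rounds the exact value of that double to 6 decimals, again ties-to-even.
-- Exact for 0 ≤ p ≤ q (the only case either program reaches: clipped values with q ≥ 3).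
def pvHalfEven (a b : Nat) : Nat :=
  let q := a / b
  let r := a % b
  if 2 * r < b then q else if b < 2 * r then q + 1 else q + q % 2

-- smallest k with q * 2^52 ≤ p * 2^k (fuel-bounded; 128 suffices for 1 ≤ p ≤ q ≤ 2^31+1)
def pvFindK (p q : Nat) : Nat → Nat → Nat
  | k, 0 => k
  | k, fuel + 1 => if q * 2 ^ 52 ≤ p * 2 ^ k then k else pvFindK p q (k + 1) fuel

def pvPad6 (n : Nat) : String :=
  let s := PySem.Int.toStr (Int.ofNat n)
  String.ofList (List.replicate (6 - s.toList.length) '0') ++ s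

def pvFmt6 (p q : Int) : String :=
  let pn := p.toNat
  let qn := q.toNat
  if pn = 0 then "0.000000"
  else
    let k := pvFindK pn qn 0 128
    let m := pvHalfEven (pn * 2 ^ k) qn          -- mantissa of the double p/q at scale 2^k
    let r := pvHalfEven (m * 10 ^ 6) (2 ^ k)     -- that double rounded to 6 decimals
    PySem.Int.toStr (Int.ofNat (r / 10 ^ 6)) ++ "." ++ pvPad6 (r % 10 ^ 6)

-- ===== PORT A =====
def clip_polygon_to_tile (seg_pts : List Int) (tx : Int) (ty : Int) (tile_size : Int) : Option (List String) :=
  let xs := (PySem.List.slice? seg_pts (some 0) none 2).getD []   -- seg_pts[0::2]; step 2 ≠ 0, never none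
  let ys := (PySem.List.slice? seg_pts (some 1) none 2).getD []   -- seg_pts[1::2]
  let txs := xs.map (fun x => max 0 (min tile_size (x - tx)))
  let tys := ys.map (fun y => max 0 (min tile_size (y - ty)))
  -- 'or' short-circuits: max(tys)/min(tys) are only evaluated when the first disjunct is False
  match PySem.List.max? txs (fun v => v), PySem.List.min? txs (fun v => v) with
  | some mxx, some mnx =>
    if mxx - mnx < 3 then none
    else
      match PySem.List.max? tys (fun v => v), PySem.List.min? tys (fun v => v) with
      | some mxy, some mny =>
        if mxy - mny < 3 then none
        else some ((txs.zip tys).foldl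
          (fun acc p => acc ++ [pvFmt6 p.1 tile_size, pvFmt6 p.2 tile_size]) [])
      | _, _ => none   -- ValueError: max() of empty tys — unreachable: tys = [] forces len(txs) = 1, extent 0 < 3
  | _, _ => none   -- ValueError: max() of an empty list (seg_pts = []) — excluded by Pre_

-- ===== PORT B =====
def pvUpdMin : Option Int → Int → Option Int
  | none, c => some c
  | some m, c => if c < m then some c else some m

def pvUpdMax : Option Int → Int → Option Int
  | none, c => some c
  | some m, c => if m < c then some c else some m

-- the while-loop of Source B: step the index by 2, clip, append, update the running extrema
def pvAltGo (tx ty ts : Int) :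
    List Int → List Int → List Int → Option Int → Option Int → Option Int → Option Int →
    List Int × List Int × Option Int × Option Int × Option Int × Option Int
  | [], txs, tys, mnx, mxx, mny, mxy => (txs, tys, mnx, mxx, mny, mxy)
  | [x], txs, tys, mnx, mxx, mny, mxy =>
      let c := max 0 (min (x - tx) ts)
      (txs ++ [c], tys, pvUpdMin mnx c, pvUpdMax mxx c, mny, mxy)
  | x :: y :: rest, txs, tys, mnx, mxx, mny, mxy =>
      let cx := max 0 (min (x - tx) ts)
      let cy := max 0 (min (y - ty) ts)
      pvAltGo tx ty ts rest (txs ++ [cx]) (tys ++ [cy])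
        (pvUpdMin mnx cx) (pvUpdMax mxx cx) (pvUpdMin mny cy) (pvUpdMax mxy cy)

def clip_polygon_to_tile_alt (seg_pts : List Int) (tx : Int) (ty : Int) (tile_size : Int) : Option (List String) :=
  match pvAltGo tx ty tile_size seg_pts [] [] none none none none with
  | (txs, tys, mnx, mxx, mny, mxy) =>
    -- Python: 'maxx - minx < 3 or maxy - miny < 3' raises TypeError while any extremum is
    -- still None (fewer than 2 points) — excluded by Pre_; match each Option separately
    match mnx with
    | none => none
    | some a =>
      match mxx with
      | none => none
      | some b =>
        if b - a < 3 then none   -- 'or' short-circuits before the y-extrema are touched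
        else
          match mny with
          | none => none
          | some c =>
            match mxy with
            | none => none
            | some d =>
              if d - c < 3 then none
              else some ((txs.zip tys).flatMap (fun p => [pvFmt6 p.1 tile_size, pvFmt6 p.2 tile_size]))

-- ===== PRECONDITION & SPEC =====
-- Pre_ excludes exactly the inputs where A raises: on seg_pts = [] max() is applied to an
-- empty list and Python raises ValueError (with one point the 'or' short-circuits first).
def Pre_clip_polygon_to_tile (seg_pts : List Int) (tx : Int) (ty : Int) (tile_size : Int) : Prop :=
  seg_pts ≠ []
instance (seg_pts : List Int) (tx : Int) (ty : Int) (tile_size : Int) : Decidable (Pre_clip_polygon_to_tile seg_pts tx ty tile_size) := by unfold Pre_clip_polygon_to_tile; infer_instance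

def pvWitness_clip_polygon_to_tile : List Int × Int × Int × Int := ([0, 0, 10, 10], 0, 0, 16)

def Spec_clip_polygon_to_tile (seg_pts : List Int) (tx : Int) (ty : Int) (tile_size : Int) (out : Option (List String)) : Prop := out = clip_polygon_to_tile_alt seg_pts tx ty tile_size
instance (seg_pts : List Int) (tx : Int) (ty : Int) (tile_size : Int) (out : Option (List String)) : Decidable (Spec_clip_polygon_to_tile seg_pts tx ty tile_size out) := by unfold Spec_clip_polygon_to_tile; infer_instance

-- ===== CLAIM (what is proved, stated in full; the proofs are below) =====
def Claim_equal_clip_polygon_to_tile : Prop := ∀ (seg_pts : List Int) (tx : Int) (ty : Int) (tile_size : Int), Dom_clip_polygon_to_tile seg_pts tx ty tile_size → Pre_clip_polygon_to_tile seg_pts tx ty tile_size → Spec_clip_polygon_to_tile seg_pts tx ty tile_size (clip_polygon_to_tile seg_pts tx ty tile_size)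

-- ===== LEMMAS AND PROOFS =====

-- xs[0::2] as a structural recursion
def pvEvens : List Int → List Int
  | [] => []
  | [x] => [x]
  | x :: _ :: r => x :: pvEvens r

theorem pvEvens_cons_tail (a : Int) (t : List Int) : pvEvens (a :: t) = a :: pvEvens t.tail := by
  cases t <;> simp [pvEvens]

theorem pv_fm_evens : ∀ xs : List Int,
    (List.range ((xs.length + 1) / 2)).filterMap (fun k => xs[2 * k]?) = pvEvens xs := by
  intro xs
  induction xs using pvEvens.induct with
  | case1 => simp [pvEvens]
  | case2 x => simp [pvEvens]
  | case3 x y r ih =>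
    have hlen : ((x :: y :: r).length + 1) / 2 = (r.length + 1) / 2 + 1 := by
      simp [List.length_cons]; omega
    rw [hlen, List.range_succ_eq_map, List.filterMap_cons, List.filterMap_map]
    simp only [List.getElem?_cons_zero, Nat.mul_zero]
    have : (fun k => (x :: y :: r)[2 * (k + 1)]?) = (fun k => r[2 * k]?) := by
      funext k
      have h2 : 2 * (k + 1) = 2 * k + 1 + 1 := by omega
      simp [h2]
    simp only [Function.comp_def, Nat.succ_eq_add_one, this, ih, pvEvens]

theorem pv_slice02 (xs : List Int) :
    PySem.List.slice? xs (some 0) none 2 = some (pvEvens xs) := by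
  rw [← pv_fm_evens]
  simp only [PySem.List.slice?, PySem.List.sliceIndices]
  norm_num
  congr 1
  congr 1
  split_ifs with h <;> omega

theorem pv_fm_odds : ∀ xs : List Int,
    (List.range (xs.length / 2)).filterMap (fun k => xs[2 * k + 1]?) = pvEvens xs.tail := by
  intro xs
  cases xs with
  | nil => simp [pvEvens]
  | cons x t =>
    simp only [List.tail_cons]
    rw [← pv_fm_evens t]
    have hlen : (x :: t).length / 2 = (t.length + 1) / 2 := by simp [List.length_cons]
    rw [hlen]
    congr 1

theorem pv_slice12 (xs : List Int) :
    PySem.List.slice? xs (some 1) none 2 = some (pvEvens xs.tail) := by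
  rw [← pv_fm_odds]
  simp only [PySem.List.slice?, PySem.List.sliceIndices]
  norm_num
  cases xs with
  | nil => simp
  | cons x t =>
    have h1 : min (1 : Int) ((x :: t).length : Int) = 1 := by
      simp [List.length_cons]
    rw [h1]
    congr 1
    · funext k
      congr 1
      omega
    · congr 1
      have hn : (x :: t).length = t.length + 1 := by simp
      split_ifs with h <;> omega

theorem pv_foldUpdMin : ∀ (cs : List Int) (a : Int),
    cs.foldl pvUpdMin (some a) = some (cs.foldl min a) := by
  intro cs
  induction cs with
  | nil => intro a; rfl
  | cons c t ih =>
    intro a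
    have : pvUpdMin (some a) c = some (min a c) := by
      simp only [pvUpdMin, min_def]
      split_ifs <;> first | rfl | (simp; omega)
    simp [List.foldl_cons, this, ih]

theorem pv_foldUpdMax : ∀ (cs : List Int) (a : Int),
    cs.foldl pvUpdMax (some a) = some (cs.foldl max a) := by
  intro cs
  induction cs with
  | nil => intro a; rfl
  | cons c t ih =>
    intro a
    have : pvUpdMax (some a) c = some (max a c) := by
      simp only [pvUpdMax, max_def]
      split_ifs <;> first | rfl | (simp; omega)
    simp [List.foldl_cons, this, ih]

theorem pvAltGo_spec (tx ty ts : Int) :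
    ∀ (l txs tys : List Int) (mnx mxx mny mxy : Option Int),
      pvAltGo tx ty ts l txs tys mnx mxx mny mxy =
        (txs ++ (pvEvens l).map (fun x => max 0 (min (x - tx) ts)),
         tys ++ (pvEvens l.tail).map (fun y => max 0 (min (y - ty) ts)),
         ((pvEvens l).map (fun x => max 0 (min (x - tx) ts))).foldl pvUpdMin mnx,
         ((pvEvens l).map (fun x => max 0 (min (x - tx) ts))).foldl pvUpdMax mxx,
         ((pvEvens l.tail).map (fun y => max 0 (min (y - ty) ts))).foldl pvUpdMin mny,
         ((pvEvens l.tail).map (fun y => max 0 (min (y - ty) ts))).foldl pvUpdMax mxy) := by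
  intro l
  induction l using pvEvens.induct with
  | case1 => intro txs tys mnx mxx mny mxy; simp [pvAltGo, pvEvens]
  | case2 x => intro txs tys mnx mxx mny mxy; simp [pvAltGo, pvEvens]
  | case3 x y r ih =>
    intro txs tys mnx mxx mny mxy
    rw [pvAltGo, ih]
    simp [pvEvens, pvEvens_cons_tail y r, List.append_assoc]

-- ===== VERDICT (by name: the statement is the Claim_ definition above) =====
theorem clip_polygon_to_tile_spec : Claim_equal_clip_polygon_to_tile := by
  intro seg_pts tx ty ts _hDom hPre
  unfold Spec_clip_polygon_to_tile
  unfold Pre_clip_polygon_to_tile at hPre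
  match hseg : seg_pts with
  | [] => simp at hPre
  | [p0] =>
    unfold clip_polygon_to_tile clip_polygon_to_tile_alt
    rw [pv_slice02, pv_slice12, pvAltGo_spec]
    simp [pvEvens, pvUpdMin, pvUpdMax, PySem.List.max?_id_cons, PySem.List.min?_id_cons]
  | p0 :: p1 :: rest =>
    unfold clip_polygon_to_tile clip_polygon_to_tile_alt
    rw [pv_slice02, pv_slice12, pvAltGo_spec]
    -- both sides now speak about the same clipped lists
    have hmm : ∀ z : Int, max 0 (min ts z) = max 0 (min z ts) := by
      intro z; rw [min_comm]
    simp only [Option.getD_some, List.tail_cons, pvEvens_cons_tail, List.map_cons,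
      List.nil_append, List.foldl_cons, hmm]
    rw [PySem.List.max?_id_cons, PySem.List.min?_id_cons, PySem.List.max?_id_cons,
      PySem.List.min?_id_cons]
    simp only [pvUpdMin, pvUpdMax, pv_foldUpdMin, pv_foldUpdMax]
    rw [PySem.List.foldl_append_eq_flatMap]
    simp
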